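-- pv_equiv track=rewrite | github.com/arielszabo/FindMeMoreLike | more_like/extraction/extractors.py | adjust_to_maximum_allowed_query_length
-- ===== SOURCE A (Python) =====
-- def adjust_to_maximum_allowed_query_length(query_properties, max_length=300):
--     """
--
--     :param query_properties: [list] a list of the movie properties to use to build the text query.
--     :param max_length: [int] the maximum size of characters wiki allows to send in a query.
--     :return:
--     """
--     allowed_size_query_properties = []
--     total_length = 0
--     for i in query_properties:
--         total_length += len(i) + 1  # the additional 1 is for the space between words
--         if total_length <= max_length + 1: # the additional 1 is for the extra space after the last word
--             allowed_size_query_properties.append(i)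
--
--     return allowed_size_query_properties
-- ===== SOURCE B (Python) =====
-- def adjust_to_maximum_allowed_query_length(query_properties, max_length=300):
--     # Stage 1: the running total grows by len(i)+1 per item, so precompute the
--     # (strictly increasing) prefix-sum sequence of cumulative lengths.
--     sums = []
--     total = 0
--     for i in query_properties:
--         total += len(i) + 1
--         sums.append(total)
--     # Stage 2: binary-search the increasing sums for the longest prefix whose
--     # cumulative length fits within max_length + 1, then return that prefix.
--     lo, hi = 0, len(sums)
--     while lo < hi:
--         mid = (lo + hi) // 2
--         if sums[mid] <= max_length + 1:
--             lo = mid + 1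
--         else:
--             hi = mid
--     return query_properties[:lo]
-- ===== Notes on version B (the rewrite author's own statement) =====
-- stated objective: alternative
-- what changed: B replaces A's single conditional-append scan by two stages: it precomputes the prefix-sum sequence of cumulative lengths and then binary-searches that strictly increasing sequence for the longest fitting prefix, returning one slice; correctness rests on the +1-per-item monotonicity of the running total.
import Mathlib
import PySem

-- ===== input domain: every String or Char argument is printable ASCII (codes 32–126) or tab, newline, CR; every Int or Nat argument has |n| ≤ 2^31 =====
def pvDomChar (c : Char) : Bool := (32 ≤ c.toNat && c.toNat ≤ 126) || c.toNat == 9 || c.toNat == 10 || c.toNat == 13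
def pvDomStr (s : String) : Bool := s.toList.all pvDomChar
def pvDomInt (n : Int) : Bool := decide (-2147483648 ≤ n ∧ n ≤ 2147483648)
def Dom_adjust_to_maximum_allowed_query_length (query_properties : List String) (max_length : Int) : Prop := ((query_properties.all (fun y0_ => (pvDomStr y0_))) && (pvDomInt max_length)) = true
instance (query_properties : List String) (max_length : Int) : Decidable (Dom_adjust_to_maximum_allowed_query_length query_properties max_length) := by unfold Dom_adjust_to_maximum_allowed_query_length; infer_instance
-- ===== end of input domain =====

-- B stages the work: prefix sums of cumulative lengths, then a binary search over that increasing sequence for the longest fitting prefix, returned as one slice (alternative algorithm, same asymptotic cost).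


-- ===== PORT A =====
def adjust_to_maximum_allowed_query_length (query_properties : List String) (max_length : Int) : List String :=
  (query_properties.foldl
    (fun (st : List String × Int) i =>
      let total := st.2 + PySem.Str.len i + 1
      (if total ≤ max_length + 1 then st.1 ++ [i] else st.1, total))
    ([], 0)).1

-- ===== PORT B =====
-- stage 1 of Source B: the loop building the prefix-sum list (state = running total)
def pvSumsLoop (qs : List String) (total : Int) : List Int :=
  match qs with
  | [] => []
  | i :: rest =>
      let t := total + PySem.Str.len i + 1
      t :: pvSumsLoop rest t

-- stage 2 of Source B: the binary-search loop (sums[mid] is always in range; pyGetD is exact there)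
def pvBSLoop (sums : List Int) (bound : Int) (lo hi : Int) : Int :=
  if h : lo < hi then
    let mid := PySem.Int.floordiv (lo + hi) 2
    if PySem.List.pyGetD sums mid 0 ≤ bound then pvBSLoop sums bound (mid + 1) hi
    else pvBSLoop sums bound lo mid
  else lo
termination_by (hi - lo).toNat
decreasing_by
  · have := PySem.Int.floordiv_two_mid_bounds (lo := lo) (hi := hi) (le_of_lt h)
    omega
  · have : PySem.Int.floordiv (lo + hi) 2 < hi := by
      rw [PySem.Int.floordiv_lt_iff_lt_mul (by omega)]; omega
    have := PySem.Int.floordiv_two_mid_bounds (lo := lo) (hi := hi) (le_of_lt h)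
    omega

def adjust_to_maximum_allowed_query_length_alt (query_properties : List String) (max_length : Int) : List String :=
  let sums := pvSumsLoop query_properties 0
  let lo := pvBSLoop sums (max_length + 1) 0 (PySem.List.len sums)
  PySem.List.slice query_properties none (some lo)

-- ===== PRECONDITION & SPEC =====
def Spec_adjust_to_maximum_allowed_query_length (query_properties : List String) (max_length : Int) (out : List String) : Prop := out = adjust_to_maximum_allowed_query_length_alt query_properties max_length
instance (query_properties : List String) (max_length : Int) (out : List String) : Decidable (Spec_adjust_to_maximum_allowed_query_length query_properties max_length out) := by unfold Spec_adjust_to_maximum_allowed_query_length; infer_instance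

-- ===== CLAIM (what is proved, stated in full; the proofs are below) =====
def Claim_equal_adjust_to_maximum_allowed_query_length : Prop := ∀ (query_properties : List String) (max_length : Int), Dom_adjust_to_maximum_allowed_query_length query_properties max_length → Spec_adjust_to_maximum_allowed_query_length query_properties max_length (adjust_to_maximum_allowed_query_length query_properties max_length)

-- ===== LEMMAS AND PROOFS =====

-- proof-side specification: length of the longest prefix fitting budget b
def pvK (qs : List String) (b : Int) : Nat :=
  match qs with
  | [] => 0
  | i :: rest =>
      let c := PySem.Str.len i + 1
      if b < c then 0 else pvK rest (b - c) + 1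

theorem pvK_le_len (qs : List String) (b : Int) : pvK qs b ≤ qs.length := by
  induction qs generalizing b with
  | nil => simp [pvK]
  | cons i rest ih =>
      simp only [pvK, List.length_cons]
      split_ifs
      · omega
      · exact Nat.succ_le_succ (ih _)

theorem pvSumsLoop_length (qs : List String) (t : Int) : (pvSumsLoop qs t).length = qs.length := by
  induction qs generalizing t with
  | nil => rfl
  | cons i rest ih => simp [pvSumsLoop, ih]

theorem pvSumsLoop_lb (qs : List String) (t : Int) : ∀ x ∈ pvSumsLoop qs t, t + 1 ≤ x := by
  induction qs generalizing t with
  | nil => simp [pvSumsLoop]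
  | cons i rest ih =>
      intro x hx
      have hl : (0:Int) ≤ PySem.Str.len i := by simp [PySem.Str.len_eq]
      simp only [pvSumsLoop, List.mem_cons] at hx
      rcases hx with rfl | hx
      · omega
      · have := ih _ _ hx; omega

theorem pvSumsLoop_pairwise (qs : List String) (t : Int) :
    List.Pairwise (· ≤ ·) (pvSumsLoop qs t) := by
  induction qs generalizing t with
  | nil => simp [pvSumsLoop]
  | cons i rest ih =>
      simp only [pvSumsLoop]
      refine List.pairwise_cons.2 ⟨fun x hx => ?_, ih _⟩
      have := pvSumsLoop_lb rest _ x hx; omega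

-- the elements of the prefix-sum list below index pvK fit the budget, and the one at pvK (if any) does not
theorem pvK_below (qs : List String) (b t : Int) :
    ∀ i (h : i < pvK qs b), (pvSumsLoop qs t)[i]'(by rw [pvSumsLoop_length]; exact lt_of_lt_of_le h (pvK_le_len qs b)) ≤ t + b := by
  induction qs generalizing b t with
  | nil => simp [pvK]
  | cons s rest ih =>
      intro i h
      simp only [pvK] at h
      split_ifs at h with hc
      · omega
      · match i with
        | 0 => simp only [pvSumsLoop, List.getElem_cons_zero]; omega
        | j + 1 =>
            simp only [pvSumsLoop, List.getElem_cons_succ]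
            have harg : (t + PySem.Str.len s + 1) + (b - (PySem.Str.len s + 1)) = t + b := by ring
            have := ih (b - (PySem.Str.len s + 1)) (t + PySem.Str.len s + 1) j (by omega)
            rw [← harg]
            exact this

theorem pvK_at (qs : List String) (b t : Int) (h : pvK qs b < qs.length) :
    ¬ (pvSumsLoop qs t)[pvK qs b]'(by rw [pvSumsLoop_length]; exact h) ≤ t + b := by
  induction qs generalizing b t with
  | nil => simp at h
  | cons s rest ih =>
      simp only [pvK, List.length_cons] at h ⊢
      split_ifs at h ⊢ with hc
      · simp only [pvSumsLoop, List.getElem_cons_zero]; omega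
      · simp only [pvSumsLoop, List.getElem_cons_succ]
        have harg : (t + PySem.Str.len s + 1) + (b - (PySem.Str.len s + 1)) = t + b := by ring
        have := ih (b - (PySem.Str.len s + 1)) (t + PySem.Str.len s + 1) (by omega)
        rw [← harg]
        exact this

-- binary-search correctness: with the target k characterised as above, the loop returns k
theorem pvBSLoop_eq (L : List Int) (b : Int) (hP : List.Pairwise (· ≤ ·) L) (k : Nat)
    (hk : k ≤ L.length)
    (hbelow : ∀ i (h : i < k), L[i]'(lt_of_lt_of_le h hk) ≤ b)
    (hat : ∀ (h : k < L.length), ¬ L[k]'h ≤ b) :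
    ∀ (lo hi : Int), 0 ≤ lo → lo ≤ k → (k : Int) ≤ hi → hi ≤ L.length →
      pvBSLoop L b lo hi = (k : Int) := by
  have hmono := List.pairwise_iff_getElem.1 hP
  intro lo hi h0 hlk hkh hhl
  have hfuel : ∃ n, (hi - lo).toNat ≤ n := ⟨(hi - lo).toNat, le_rfl⟩
  obtain ⟨n, hn⟩ := hfuel
  induction n generalizing lo hi with
  | zero =>
      rw [pvBSLoop]
      rw [dif_neg (by omega)]
      omega
  | succ m ih =>
      rw [pvBSLoop]
      by_cases h : lo < hi
      · rw [dif_pos h]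
        have hmid := PySem.Int.floordiv_two_mid_bounds (lo := lo) (hi := hi) (le_of_lt h)
        have hmlt : PySem.Int.floordiv (lo + hi) 2 < hi := by
          rw [PySem.Int.floordiv_lt_iff_lt_mul (by omega)]; omega
        set mid := PySem.Int.floordiv (lo + hi) 2 with hmiddef
        have hmr : mid.toNat < L.length := by omega
        have hget : PySem.List.pyGetD L mid 0 = L[mid.toNat]'hmr :=
          PySem.List.pyGetD_eq_getElem L 0 (by omega) (by omega)
        by_cases hc : PySem.List.pyGetD L mid 0 ≤ b
        · rw [if_pos hc]
          -- sums[mid] ≤ b forces mid < k (else L[k] ≤ L[mid] ≤ b contradicts hat)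
          have hmk : mid < (k : Int) := by
            by_contra hge
            have hkl : k < L.length := by omega
            have hkm : k ≤ mid.toNat := by omega
            have : L[k]'hkl ≤ b := by
              rcases Nat.lt_or_ge k mid.toNat with hlt | hge2
              · exact le_trans (hmono k mid.toNat (by omega) hmr hlt) (hget ▸ hc)
              · have : k = mid.toNat := by omega
                subst this; exact hget ▸ hc
            exact hat hkl this
          exact ih (mid + 1) hi (by omega) (by omega) hkh hhl (by omega)
        · rw [if_neg hc]
          -- ¬ sums[mid] ≤ b forces k ≤ mid (else hbelow at mid contradicts)
          have hkm : (k : Int) ≤ mid := by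
            by_contra hgt
            have hml : mid.toNat < k := by omega
            exact hc (hget ▸ hbelow mid.toNat hml)
          exact ih lo mid h0 hlk hkm (by omega) (by omega)
      · rw [dif_neg h]; omega

-- A never appends again once the running total exceeds the bound
theorem pvA_never (max_length : Int) (qs : List String) (res : List String) (t : Int)
    (h : max_length + 1 < t) :
    (qs.foldl
      (fun (st : List String × Int) i =>
        let total := st.2 + PySem.Str.len i + 1
        (if total ≤ max_length + 1 then st.1 ++ [i] else st.1, total))
      (res, t)).1 = res := by
  induction qs generalizing res t with
  | nil => rfl
  | cons s rest ih =>
      have hl : (0:Int) ≤ PySem.Str.len s := by simp [PySem.Str.len_eq]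
      simp only [List.foldl_cons]
      rw [if_neg (by omega)]
      exact ih res (t + PySem.Str.len s + 1) (by omega)

-- A's loop keeps exactly the longest fitting prefix
theorem pvA_main (max_length : Int) (qs : List String) (res : List String) (t : Int) :
    (qs.foldl
      (fun (st : List String × Int) i =>
        let total := st.2 + PySem.Str.len i + 1
        (if total ≤ max_length + 1 then st.1 ++ [i] else st.1, total))
      (res, t)).1
    = res ++ qs.take (pvK qs (max_length + 1 - t)) := by
  induction qs generalizing res t with
  | nil => simp [pvK]
  | cons s rest ih =>
      have hl : (0:Int) ≤ PySem.Str.len s := by simp [PySem.Str.len_eq]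
      simp only [List.foldl_cons, pvK]
      by_cases h : max_length + 1 - t < PySem.Str.len s + 1
      · rw [if_pos h, if_neg (by omega)]
        rw [pvA_never max_length rest res _ (by omega)]
        simp
      · rw [if_neg h, if_pos (by omega)]
        rw [ih (res ++ [s]) (t + PySem.Str.len s + 1)]
        have harg : max_length + 1 - (t + PySem.Str.len s + 1)
            = max_length + 1 - t - (PySem.Str.len s + 1) := by ring
        rw [harg, List.take_succ_cons]
        simp

-- ===== VERDICT (by name: the statement is the Claim_ definition above) =====
theorem adjust_to_maximum_allowed_query_length_spec : Claim_equal_adjust_to_maximum_allowed_query_length := by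
  intro qs ml _
  unfold Spec_adjust_to_maximum_allowed_query_length
  unfold adjust_to_maximum_allowed_query_length adjust_to_maximum_allowed_query_length_alt
  have hbs := pvBSLoop_eq (pvSumsLoop qs 0) (ml + 1) (pvSumsLoop_pairwise qs 0)
    (pvK qs (ml + 1))
    (by rw [pvSumsLoop_length]; exact pvK_le_len qs (ml + 1))
    (fun i h => by simpa using pvK_below qs (ml + 1) 0 i h)
    (fun h => by simpa using pvK_at qs (ml + 1) 0 (by rw [pvSumsLoop_length] at h; exact h))
    0 (PySem.List.len (pvSumsLoop qs 0)) le_rfl (by omega)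
    (by simp [PySem.List.len_eq, pvSumsLoop_length]; exact_mod_cast pvK_le_len qs (ml + 1))
    (by simp [PySem.List.len_eq])
  simp only [hbs]
  rw [PySem.List.slice_to qs (by omega)]
  have := pvA_main ml qs [] 0
  simpa using this
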